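-- pv_equiv track=rewrite | github.com/GothicBat5/WorldSystem | Criminal Case Special/ranking_system.py | get_rank_info
-- ===== SOURCE A (Python) =====
-- RANKS = [
--     (1, "Officer"),
--     (5, "Deputy"),
--     (12, "Detective"),
--     (20, "Corporal"),
--     (32, "Sergeant"),
--     (45, "Lieutenant"),
--     (60, "Captain"),
--     (75, "Major"),
--     (100, "Inspector"),
--     (125, "Lead Inspector"),
--     (150, "Commander"),
--     (175, "Deputy Chief"),
--     (200, "Commissioner"),
--     (250, "Sheriff"),
--     (300, "Ranger"),
--     (350, "Marshal"),
--     (400, "Senior Trooper"),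
--     (500, "General"),
--     (600, "Secret Agent"),
--     (700, "Unit Chief"),
--     (775, "Superintendent"),
--     (850, "Vice Director")
-- ]
--
-- ICONS = ["Bronze", "Silver", "Gold"]
--
-- def get_rank_info(level):
--     current_name = "Unknown"
--     current_index = 0
--
--     for i, (lvl, name) in enumerate(RANKS):
--         if level >= lvl:
--             current_name = name
--             current_index = i
--         else:
--             break
--
--     icon = ICONS[current_index % 3]
--     return current_name, icon, current_index
-- ===== SOURCE B (Python) =====
-- RANKS = [
--     (1, "Officer"),
--     (5, "Deputy"),
--     (12, "Detective"),
--     (20, "Corporal"),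
--     (32, "Sergeant"),
--     (45, "Lieutenant"),
--     (60, "Captain"),
--     (75, "Major"),
--     (100, "Inspector"),
--     (125, "Lead Inspector"),
--     (150, "Commander"),
--     (175, "Deputy Chief"),
--     (200, "Commissioner"),
--     (250, "Sheriff"),
--     (300, "Ranger"),
--     (350, "Marshal"),
--     (400, "Senior Trooper"),
--     (500, "General"),
--     (600, "Secret Agent"),
--     (700, "Unit Chief"),
--     (775, "Superintendent"),
--     (850, "Vice Director")
-- ]
--
-- ICONS = ["Bronze", "Silver", "Gold"]
--
-- THRESHOLDS = [lvl for lvl, _ in RANKS]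
--
-- def get_rank_info(level):
--     # binary search: number of thresholds <= level (bisect_right)
--     lo, hi = 0, len(THRESHOLDS)
--     while lo < hi:
--         mid = (lo + hi) // 2
--         if level < THRESHOLDS[mid]:
--             hi = mid
--         else:
--             lo = mid + 1
--     if lo == 0:
--         return "Unknown", "Bronze", 0
--     i = lo - 1
--     return RANKS[i][1], ICONS[i % 3], i
-- ===== Notes on version B (the rewrite author's own statement) =====
-- stated objective: alternative
-- what changed: Replaced A's linear enumerate-and-break scan over RANKS by a binary search (bisect_right) over a prebuilt threshold list, with the index-0/'Unknown' case handled explicitly.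
import Mathlib
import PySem

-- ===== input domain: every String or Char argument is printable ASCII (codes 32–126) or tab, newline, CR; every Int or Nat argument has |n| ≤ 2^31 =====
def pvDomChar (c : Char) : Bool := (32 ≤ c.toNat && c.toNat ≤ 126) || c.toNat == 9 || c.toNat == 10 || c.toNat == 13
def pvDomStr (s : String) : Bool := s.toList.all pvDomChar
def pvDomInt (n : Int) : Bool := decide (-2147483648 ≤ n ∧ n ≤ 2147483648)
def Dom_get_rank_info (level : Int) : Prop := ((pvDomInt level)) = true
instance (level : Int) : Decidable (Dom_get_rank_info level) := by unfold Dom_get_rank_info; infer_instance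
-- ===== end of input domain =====

-- ===== PORT A =====
-- B replaces A's linear enumerate-and-break scan over RANKS by a binary search over the threshold list (alternative decomposition).
def RANKS : List (Int × String) :=
  [(1, "Officer"), (5, "Deputy"), (12, "Detective"), (20, "Corporal"),
   (32, "Sergeant"), (45, "Lieutenant"), (60, "Captain"), (75, "Major"),
   (100, "Inspector"), (125, "Lead Inspector"), (150, "Commander"),
   (175, "Deputy Chief"), (200, "Commissioner"), (250, "Sheriff"),
   (300, "Ranger"), (350, "Marshal"), (400, "Senior Trooper"),
   (500, "General"), (600, "Secret Agent"), (700, "Unit Chief"),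
   (775, "Superintendent"), (850, "Vice Director")]

def ICONS : List String := ["Bronze", "Silver", "Gold"]

-- the for-loop with break, transcribed: carries (current_name, current_index)
def rank_loop (level : Int) (pairs : List (Int × (Int × String))) (curName : String) (curIdx : Int) : String × Int :=
  match pairs with
  | [] => (curName, curIdx)
  | (i, (lvl, name)) :: rest =>
      if level ≥ lvl then rank_loop level rest name i
      else (curName, curIdx)

def get_rank_info (level : Int) : String × String × Int :=
  let r := rank_loop level (PySem.List.enumerate RANKS) "Unknown" 0
  -- ICONS[current_index % 3]: index is always 0..2, pyGet? always returns some; "" is unreachable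
  let icon := (PySem.List.pyGet? ICONS (PySem.Int.mod r.2 3)).getD ""
  (r.1, icon, r.2)

-- ===== PORT B =====
def THRESHOLDS : List Int := RANKS.map Prod.fst

-- the while-loop of Source B's binary search (bisect_right), transcribed; terminates since hi - lo shrinks
def bisect_loop (level : Int) (lo hi : Nat) : Nat :=
  if lo < hi then
    let mid := (lo + hi) / 2
    if level < THRESHOLDS.getD mid 0 then bisect_loop level lo mid
    else bisect_loop level (mid + 1) hi
  else lo
termination_by hi - lo
decreasing_by all_goals omega

def get_rank_info_alt (level : Int) : String × String × Int :=
  let lo := bisect_loop level 0 THRESHOLDS.length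
  if lo = 0 then ("Unknown", "Bronze", 0)
  else
    let i := lo - 1
    (((PySem.List.pyGet? RANKS (Int.ofNat i)).getD (0, "")).2,
     (PySem.List.pyGet? ICONS (Int.ofNat (i % 3))).getD "",
     (Int.ofNat i))

-- ===== PRECONDITION & SPEC =====
def Spec_get_rank_info (level : Int) (out : String × String × Int) : Prop := out = get_rank_info_alt level
instance (level : Int) (out : String × String × Int) : Decidable (Spec_get_rank_info level out) := by unfold Spec_get_rank_info; infer_instance

-- ===== CLAIM (what is proved, stated in full; the proofs are below) =====
def Claim_equal_get_rank_info : Prop := ∀ (level : Int), Dom_get_rank_info level → Spec_get_rank_info level (get_rank_info level)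

-- ===== LEMMAS AND PROOFS =====

-- THRESHOLDS is sorted (checked by computation)
theorem thr_sorted : ∀ j, j < 22 → ∀ i, i < 22 → i ≤ j →
    THRESHOLDS.getD i 0 ≤ THRESHOLDS.getD j 0 := by decide

-- binary-search invariant: the result r has all thresholds below r ≤ level and all at/after r > level
theorem bisect_inv (level : Int) : ∀ lo hi : Nat, hi ≤ 22 → lo ≤ hi →
    (∀ i, i < lo → THRESHOLDS.getD i 0 ≤ level) →
    (∀ i, hi ≤ i → i < 22 → level < THRESHOLDS.getD i 0) →
    bisect_loop level lo hi ≤ 22 ∧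
    (∀ i, i < bisect_loop level lo hi → THRESHOLDS.getD i 0 ≤ level) ∧
    (∀ i, bisect_loop level lo hi ≤ i → i < 22 → level < THRESHOLDS.getD i 0) := by
  intro lo hi
  fun_induction bisect_loop level lo hi with
  | case1 lo hi hlt mid hcmp ih =>
    intro h22 _ hlo hhi
    exact ih (by omega) (by omega) hlo
      (fun i hmi hi22 => lt_of_lt_of_le hcmp (thr_sorted i hi22 mid (by omega) hmi))
  | case2 lo hi hlt mid hcmp ih =>
    intro h22 _ hlo hhi
    refine ih h22 (by omega) (fun i hi1 => ?_) hhi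
    by_cases hc : i < lo
    · exact hlo i hc
    · exact le_trans (thr_sorted mid (by omega) i (by omega) (by omega)) (not_lt.mp hcmp)
  | case3 lo hi hlt =>
    intro h22 hle hlo hhi
    exact ⟨by omega, hlo, fun i hi1 hi2 => hhi i (by omega) hi2⟩

theorem thr_eq : ∀ k, k < 22 → THRESHOLDS.getD k 0 = (RANKS.getD k (0, "")).1 := by decide

-- A's scan-with-break, characterized by the insertion point p
theorem rank_loop_char (level : Int) (p : Nat) (hp : p ≤ 22)
    (hF1 : ∀ i, i < p → THRESHOLDS.getD i 0 ≤ level)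
    (hF2 : ∀ i, p ≤ i → i < 22 → level < THRESHOLDS.getD i 0) :
    ∀ n k, 22 - k = n → k ≤ 22 → ∀ (name : String) (idx : Int),
    rank_loop level (PySem.List.enumerate (RANKS.drop k) (k : Int)) name idx =
      if p ≤ k then (name, idx) else ((RANKS.getD (p-1) (0, "")).2, ((p : Int) - 1)) := by
  intro n
  induction n with
  | zero =>
    intro k hn hk name idx
    have hk22 : k = 22 := by omega
    subst hk22
    have hd : RANKS.drop 22 = [] := by decide
    rw [hd]
    simp [PySem.List.enumerate, rank_loop, if_pos hp]
  | succ n ih =>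
    intro k hn hk name idx
    have hklt : k < 22 := by omega
    have hkR : k < RANKS.length := by simp [RANKS]; omega
    rw [List.drop_eq_getElem_cons hkR, PySem.List.enumerate_cons]
    have hget : RANKS[k] = RANKS.getD k (0, "") := (List.getD_eq_getElem RANKS (0,"") hkR).symm
    rw [hget]
    have hthr : THRESHOLDS.getD k 0 = (RANKS.getD k (0, "")).1 := thr_eq k hklt
    rcases hR : RANKS.getD k (0, "") with ⟨lvl, nm⟩
    by_cases hcmp : level ≥ lvl
    · -- loop continues
      have hkp : k < p := by
        by_contra h
        have h2 := hF2 k (by omega) hklt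
        rw [hthr, hR] at h2
        omega
      simp only [rank_loop, if_pos hcmp]
      have hcast : ((k : Int) + 1) = ((k + 1 : Nat) : Int) := by push_cast; ring
      rw [hcast, ih (k + 1) (by omega) (by omega) nm (k : Int)]
      rw [if_neg (by omega : ¬ p ≤ k)]
      by_cases hpk : p ≤ k + 1
      · have hpe : p = k + 1 := by omega
        subst hpe
        rw [if_pos (le_refl _)]
        have : k + 1 - 1 = k := by omega
        rw [this, hR]
        refine Prod.ext rfl ?_
        push_cast; ring
      · rw [if_neg hpk]
    · -- break
      have hpk : p ≤ k := by
        by_contra hpk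
        have h2 := hF1 k (by omega)
        rw [hthr, hR] at h2
        omega
      simp only [rank_loop, if_neg hcmp, if_pos hpk]

-- ===== VERDICT (by name: the statement is the Claim_ definition above) =====
theorem get_rank_info_spec : Claim_equal_get_rank_info := by
  intro level _
  unfold Spec_get_rank_info
  simp only [get_rank_info, get_rank_info_alt]
  have hlen : THRESHOLDS.length = 22 := rfl
  rw [hlen]
  obtain ⟨hp, hF1, hF2⟩ := bisect_inv level 0 22 (by omega) (by omega)
    (fun i h => absurd h (Nat.not_lt_zero i))
    (fun i h1 h2 => absurd (lt_of_le_of_lt h1 h2) (lt_irrefl 22))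
  have hr := rank_loop_char level (bisect_loop level 0 22) hp hF1 hF2 22 0 rfl (by omega) "Unknown" 0
  rw [List.drop_zero] at hr
  rw [show ((0:Nat):Int) = 0 from rfl] at hr
  rw [hr]
  set p := bisect_loop level 0 22 with hpd
  clear_value p
  clear hr hF1 hF2 hpd
  interval_cases p <;> decide
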